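-- pv_equiv track=rewrite | github.com/Engineernoob/commit-message-generator | git-commit/backend/dungeon.py | _cross_room
-- ===== SOURCE A (Python) =====
-- from typing import Dict, List, Tuple
--
-- def _cross_room(W: int, H: int) -> List[str]:
--     third = W // 3
--     mid   = W - 2 * third
--     lines: List[str] = []
--     for row in range(H):
--         if row < H // 3 or row >= H * 2 // 3:
--             pad = " " * third
--             lines.append((pad + "|" + " " * max(0, mid - 2) + "|" + pad).ljust(W)[:W])
--         else:
--             lines.append(("+" + "-" * (W - 2) + "+").ljust(W)[:W])
--     return lines
-- ===== SOURCE B (Python) =====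
-- from typing import List
--
-- def _cross_room(W: int, H: int) -> List[str]:
--     # Coordinate rendering: each cell's character is computed from its (row, col)
--     # position, instead of assembling rows from padded/concatenated substrings.
--     third = W // 3
--     bar2 = third + 1 + max(0, W - 2 * third - 2)
--     top = H // 3
--     bot = H * 2 // 3
--
--     def cell(r: int, c: int) -> str:
--         if top <= r < bot:
--             return '+' if c == 0 or c == W - 1 else '-'
--         return '|' if c == third or c == bar2 else ' '
--
--     return [''.join(cell(r, c) for c in range(W)) for r in range(H)]
-- ===== Notes on version B (the rewrite author's own statement) =====
-- stated objective: alternative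
-- what changed: A assembles each row by concatenating padded substrings and then ljust/slicing; B renders the grid cell-by-cell, computing each character directly from its (row, col) coordinates against the precomputed bar/band positions, with no string concatenation, padding or slicing.
-- intended difference: For W = -1 with H > 0, A's negative slice [ :W] keeps one character of the two-character row strings and returns rows "|"/"+" for a negative room width; B returns empty rows there (as A itself does for every other W <= 0), the intended value. — e.g. on _cross_room(-1, 1): A returns ["|"], B returns [""]
import Mathlib
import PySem

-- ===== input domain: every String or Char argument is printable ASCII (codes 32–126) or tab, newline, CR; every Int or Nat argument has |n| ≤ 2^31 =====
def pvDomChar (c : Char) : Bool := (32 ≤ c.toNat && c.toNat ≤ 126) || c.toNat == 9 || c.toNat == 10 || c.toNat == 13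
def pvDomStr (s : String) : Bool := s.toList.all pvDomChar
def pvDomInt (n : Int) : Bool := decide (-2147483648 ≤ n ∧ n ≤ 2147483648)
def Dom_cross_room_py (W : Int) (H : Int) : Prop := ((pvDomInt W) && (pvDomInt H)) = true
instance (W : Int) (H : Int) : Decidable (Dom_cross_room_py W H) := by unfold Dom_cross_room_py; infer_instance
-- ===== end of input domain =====

-- B renders each cell from its (row, col) coordinates instead of assembling rows from
-- padded/sliced substrings (objective: alternative; outputs identical except W = -1, see D_).

-- ===== PORT A =====
-- s.ljust(W)[:W] : pad with spaces to width W (no-op if already longer), then slice [:W]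
def pvLjustTrunc (cs : List Char) (W : Int) : List Char :=
  PySem.List.slice (cs ++ List.replicate (W - (cs.length : Int)).toNat ' ') none (some W)

def cross_room_py (W : Int) (H : Int) : List String :=
  let third := PySem.Int.floordiv W 3
  let mid := W - 2 * third
  (PySem.List.pyRange 0 H 1).foldl
    (fun lines row =>
      if row < PySem.Int.floordiv H 3 ∨ PySem.Int.floordiv (H * 2) 3 ≤ row then
        let pad := List.replicate third.toNat ' '
        lines ++ [String.ofList (pvLjustTrunc (pad ++ ['|'] ++ List.replicate (max 0 (mid - 2)).toNat ' ' ++ ['|'] ++ pad) W)]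
      else
        lines ++ [String.ofList (pvLjustTrunc (['+'] ++ List.replicate (W - 2).toNat '-' ++ ['+']) W)])
    []

-- ===== PORT B =====
def cross_room_py_alt (W : Int) (H : Int) : List String :=
  let third := PySem.Int.floordiv W 3
  let bar2 := third + 1 + max 0 (W - 2 * third - 2)
  let top := PySem.Int.floordiv H 3
  let bot := PySem.Int.floordiv (H * 2) 3
  (PySem.List.pyRange 0 H 1).map (fun r =>
    String.ofList ((PySem.List.pyRange 0 W 1).map (fun c =>
      if top ≤ r ∧ r < bot then
        if c = 0 ∨ c = W - 1 then '+' else '-'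
      else
        if c = third ∨ c = bar2 then '|' else ' ')))

-- ===== PRECONDITION & SPEC =====
-- For W = -1 with at least one row, A's negative slice [:-1] keeps one character of the
-- two-character row strings, returning rows "|" / "+" for a NEGATIVE room width; B returns
-- empty rows there (as A itself does for every other W ≤ 0), the intended value.
def D_cross_room_py (W : Int) (H : Int) : Prop := W = -1 ∧ 0 < H
instance (W : Int) (H : Int) : Decidable (D_cross_room_py W H) := by unfold D_cross_room_py; infer_instance

def Spec_cross_room_py (W : Int) (H : Int) (out : List String) : Prop := ¬ D_cross_room_py W H → out = cross_room_py_alt W H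
instance (W : Int) (H : Int) (out : List String) : Decidable (Spec_cross_room_py W H out) := by unfold Spec_cross_room_py; infer_instance

def pvDiffWitness_cross_room_py : Int × Int := (-1, 1)
def pvDiffWitnessOut_cross_room_py : (List String) × (List String) := (["|"], [""])

-- ===== CLAIM (what is proved, stated in full; the proofs are below) =====
def Claim_unchanged_cross_room_py : Prop := ∀ (W : Int) (H : Int), Dom_cross_room_py W H → Spec_cross_room_py W H (cross_room_py W H)
def Claim_changed_cross_room_py : Prop := Dom_cross_room_py (pvDiffWitness_cross_room_py.1) (pvDiffWitness_cross_room_py.2) ∧ D_cross_room_py (pvDiffWitness_cross_room_py.1) (pvDiffWitness_cross_room_py.2) ∧ cross_room_py (pvDiffWitness_cross_room_py.1) (pvDiffWitness_cross_room_py.2) = pvDiffWitnessOut_cross_room_py.1 ∧ cross_room_py_alt (pvDiffWitness_cross_room_py.1) (pvDiffWitness_cross_room_py.2) = pvDiffWitnessOut_cross_room_py.2 ∧ pvDiffWitnessOut_cross_room_py.1 ≠ pvDiffWitnessOut_cross_room_py.2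
def Claim_exact_cross_room_py : Prop := ∀ (W : Int) (H : Int), Dom_cross_room_py W H → D_cross_room_py W H → cross_room_py W H ≠ cross_room_py_alt W H

-- ===== LEMMAS AND PROOFS =====

-- A's wall row equals B's per-column rendering of it (any pad width t, gap s, 0 ≤ W)
theorem pv_wall_eq (t s : Nat) (W : Int) (hW : 0 ≤ W) :
    pvLjustTrunc (List.replicate t ' ' ++ ['|'] ++ List.replicate s ' ' ++ ['|'] ++ List.replicate t ' ') W
      = (PySem.List.pyRange 0 W 1).map (fun c => if c = (t:Int) ∨ c = (t:Int)+1+(s:Int) then '|' else ' ') := by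
  obtain ⟨n, rfl⟩ : ∃ n : Nat, W = (n : Int) := ⟨W.toNat, (Int.toNat_of_nonneg hW).symm⟩
  rw [pvLjustTrunc, PySem.List.slice_to (b := (n:Int)) _ (by positivity), PySem.List.pyRange_zero_natCast, List.map_map]
  apply List.ext_getElem
  · simp; omega
  · intro i h1 h2
    simp at h1 h2
    simp only [List.getElem_take, List.getElem_map, Function.comp]
    simp [List.getElem_append, List.getElem_replicate, List.getElem_cons]
    split_ifs <;> first | rfl | omega

-- A's border row equals B's per-column rendering of it (0 ≤ W)
theorem pv_border_eq (W : Int) (hW : 0 ≤ W) :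
    pvLjustTrunc (['+'] ++ List.replicate (W - 2).toNat '-' ++ ['+']) W
      = (PySem.List.pyRange 0 W 1).map (fun c => if c = 0 ∨ c = W - 1 then '+' else '-') := by
  obtain ⟨n, rfl⟩ : ∃ n : Nat, W = (n : Int) := ⟨W.toNat, (Int.toNat_of_nonneg hW).symm⟩
  rw [pvLjustTrunc, PySem.List.slice_to (b := (n:Int)) _ (by positivity), PySem.List.pyRange_zero_natCast, List.map_map]
  apply List.ext_getElem
  · simp; omega
  · intro i h1 h2
    simp at h1 h2
    simp only [List.getElem_take, List.getElem_map, Function.comp]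
    simp [List.getElem_append, List.getElem_replicate, List.getElem_cons]
    split_ifs <;> first | rfl | omega

-- a two-character row sliced to a width ≤ -2 is empty
theorem pv_slice_nonpos {α : Type} (xs : List α) (W : Int) (h : W ≤ -(xs.length : Int)) :
    PySem.List.slice xs none (some W) = [] := by
  simp only [PySem.List.slice, PySem.List.clampIdx]
  split_ifs <;> simp_all <;> omega

-- for W ≤ -2 the wall gap max(0, mid-2) is 0 and third < 0
theorem pv_neg_bounds (W : Int) (hW : W ≤ -2) :
    PySem.Int.floordiv W 3 < 0 ∧ W - 2 * PySem.Int.floordiv W 3 - 2 ≤ 0 := by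
  have hm := PySem.Int.floordiv_mul_add_mod W 3
  have h0 := PySem.Int.mod_nonneg W (b := 3) (by omega)
  have h1 := PySem.Int.mod_lt W (b := 3) (by omega)
  omega

theorem pv_foldl_to_map (c : Int → Prop) [DecidablePred c] (v h : String) (xs : List Int) :
    xs.foldl (fun lines row => if c row then lines ++ [v] else lines ++ [h]) []
      = xs.map (fun row => if c row then v else h) := by
  have : (fun (lines : List String) row => if c row then lines ++ [v] else lines ++ [h])
       = (fun lines row => lines ++ [if c row then v else h]) := by
    funext lines row
    exact (apply_ite (fun x => lines ++ [x]) (c row) v h).symm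
  rw [this, PySem.List.foldl_append_singleton_eq_map]
  simp

-- ===== VERDICT (by name: the statement is the Claim_ definition above) =====
theorem cross_room_py_spec : Claim_unchanged_cross_room_py := by
  intro W H _ hnD
  unfold cross_room_py cross_room_py_alt
  simp only []
  rw [pv_foldl_to_map]
  apply List.map_congr_left
  intro r hr
  rw [PySem.List.mem_pyRange_one] at hr
  by_cases hH : H ≤ 0
  · exact absurd hr.2 (by omega)
  have hW : W ≠ -1 := fun hw => hnD ⟨hw, by omega⟩
  have hcompl : (r < PySem.Int.floordiv H 3 ∨ PySem.Int.floordiv (H * 2) 3 ≤ r)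
      ↔ ¬ (PySem.Int.floordiv H 3 ≤ r ∧ r < PySem.Int.floordiv (H * 2) 3) := by omega
  rcases (by omega : 0 ≤ W ∨ W < 0) with hW0 | hWneg
  · -- 0 ≤ W : both rows render the same string
    have h3 : (0:Int) ≤ PySem.Int.floordiv W 3 := by
      have hm := PySem.Int.floordiv_mul_add_mod W 3
      have h0 := PySem.Int.mod_nonneg W (b := 3) (by omega)
      have h1 := PySem.Int.mod_lt W (b := 3) (by omega)
      omega
    by_cases hmidr : PySem.Int.floordiv H 3 ≤ r ∧ r < PySem.Int.floordiv (H * 2) 3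
    · rw [if_neg (hcompl.mp.mt (not_not.mpr hmidr)),
        List.map_congr_left (fun c _ => if_pos hmidr)]
      exact congrArg String.ofList (pv_border_eq W hW0)
    · rw [if_pos (hcompl.mpr hmidr),
        List.map_congr_left (fun c _ => if_neg hmidr)]
      apply congrArg String.ofList
      rw [pv_wall_eq (PySem.Int.floordiv W 3).toNat (max 0 (W - 2 * PySem.Int.floordiv W 3 - 2)).toNat W hW0]
      simp only [Int.toNat_of_nonneg h3, Int.toNat_of_nonneg (le_max_left 0 (W - 2 * PySem.Int.floordiv W 3 - 2))]
  · -- W ≤ -2 : every row is empty on both sides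
    have hW2 : W ≤ -2 := by omega
    obtain ⟨h3, hs⟩ := pv_neg_bounds W hW2
    have hrange : PySem.List.pyRange 0 W 1 = [] := PySem.List.pyRange_one_eq_nil (by omega)
    rw [hrange]
    by_cases hmidr : PySem.Int.floordiv H 3 ≤ r ∧ r < PySem.Int.floordiv (H * 2) 3
    · rw [if_neg (hcompl.mp.mt (not_not.mpr hmidr)), pvLjustTrunc,
        pv_slice_nonpos _ W (by simp; omega)]
      simp
    · rw [if_pos (hcompl.mpr hmidr), pvLjustTrunc,
        pv_slice_nonpos _ W (by simp; omega)]
      simp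

theorem cross_room_py_changed : Claim_changed_cross_room_py := by
  unfold Claim_changed_cross_room_py; decide

theorem cross_room_py_tight : Claim_exact_cross_room_py := by
  intro W H _ hD heq
  obtain ⟨hW, hH⟩ := hD
  subst hW
  unfold cross_room_py cross_room_py_alt at heq
  simp only [] at heq
  rw [pv_foldl_to_map] at heq
  rw [show PySem.List.pyRange 0 (-1 : Int) 1 = [] from PySem.List.pyRange_one_eq_nil (by omega)] at heq
  rw [PySem.List.pyRange_one_cons hH, List.map_cons, List.map_cons] at heq
  have hhead := List.head_eq_of_cons_eq heq
  simp only [List.map_nil] at hhead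
  by_cases hc : ((0:Int) < PySem.Int.floordiv H 3 ∨ PySem.Int.floordiv (H * 2) 3 ≤ 0)
  · rw [if_pos hc] at hhead
    exact absurd hhead (by decide)
  · rw [if_neg hc] at hhead
    exact absurd hhead (by decide)
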